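-- pv_equiv track=rewrite | github.com/Veinerlein/python112 | 41.py | letter_in_string_chenger
-- ===== SOURCE A (Python) =====
-- def letter_in_string_chenger(str, old, new):
--     res_str = ""
--     for s in range(len(str)):
--         if str[s] == old and s % 2 != 0:
--             res_str += new
--         else:
--             res_str += str[s]
--     return res_str
-- ===== SOURCE B (Python) =====
-- def letter_in_string_chenger(str, old, new):
--     # pairwise pass: consume two characters at a time; only the second of each
--     # pair sits at an odd index and is eligible for replacement
--     pieces = []
--     it = iter(str)
--     for a in it:
--         pieces.append(a)
--         b = next(it, None)
--         if b is not None: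
--             pieces.append(new if b == old else b)
--     return ''.join(pieces)
-- ===== Notes on version B (the rewrite author's own statement) =====
-- stated objective: alternative
-- what changed: Replaces the indexed scan with a parity test by a pairwise iterator pass that consumes two characters at a time and joins collected pieces, so no indices, modulus or quadratic string concatenation are needed.
import Mathlib
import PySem

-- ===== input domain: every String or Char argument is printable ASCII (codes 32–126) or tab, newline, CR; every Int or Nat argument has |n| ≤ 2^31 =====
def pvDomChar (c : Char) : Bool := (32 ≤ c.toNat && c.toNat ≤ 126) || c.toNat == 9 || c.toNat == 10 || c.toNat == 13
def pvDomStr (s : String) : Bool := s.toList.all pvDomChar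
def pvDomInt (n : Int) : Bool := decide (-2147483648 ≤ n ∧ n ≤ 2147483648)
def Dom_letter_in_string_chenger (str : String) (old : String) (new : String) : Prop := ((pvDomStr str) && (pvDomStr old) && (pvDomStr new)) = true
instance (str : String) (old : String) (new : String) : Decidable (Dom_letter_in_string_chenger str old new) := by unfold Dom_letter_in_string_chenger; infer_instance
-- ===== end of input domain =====

-- B replaces A's indexed scan with a parity test by a pairwise pass consuming two
-- characters at a time (alternative decomposition; same cost).

-- ===== PORT A =====
-- strings are handled as their lists of code points; str[s] == old compares the
-- one-character string [c] with old's characters, exact on the ASCII domain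
def letter_in_string_chenger (str : String) (old : String) (new : String) : String :=
  String.mk ((PySem.List.pyRange 0 (str.toList.length : Int) 1).foldl
    (fun res s =>
      if [PySem.List.pyGetD str.toList s ' '] = old.toList ∧ s % 2 ≠ 0 then
        res ++ new.toList
      else
        res ++ [PySem.List.pyGetD str.toList s ' ']) [])

-- ===== PORT B =====
-- pairwise pass of Source B: emit the first char of each pair unchanged, replace the
-- second (the odd-indexed one) when it equals old; a trailing unpaired char passes through
def pvPairs (old new : List Char) : List Char → List Char
  | [] => []
  | [a] => [a]
  | a :: b :: r => a :: ((if [b] = old then new else [b]) ++ pvPairs old new r)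

def letter_in_string_chenger_alt (str : String) (old : String) (new : String) : String :=
  String.mk (pvPairs old.toList new.toList str.toList)

-- ===== PRECONDITION & SPEC =====
def Spec_letter_in_string_chenger (str : String) (old : String) (new : String) (out : String) : Prop := out = letter_in_string_chenger_alt str old new
instance (str : String) (old : String) (new : String) (out : String) : Decidable (Spec_letter_in_string_chenger str old new out) := by unfold Spec_letter_in_string_chenger; infer_instance

-- ===== CLAIM (what is proved, stated in full; the proofs are below) =====
def Claim_equal_letter_in_string_chenger : Prop := ∀ (str : String) (old : String) (new : String), Dom_letter_in_string_chenger str old new → Spec_letter_in_string_chenger str old new (letter_in_string_chenger str old new)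

-- ===== LEMMAS AND PROOFS =====

-- index-annotated characterisation of the replacement, common to both proofs
def pvG (old new : List Char) : List Char → Nat → List Char
  | [], _ => []
  | c :: cs, i => (if [c] = old ∧ i % 2 ≠ 0 then new else [c]) ++ pvG old new cs (i + 1)

theorem pvFold_eq_pvG (old new l : List Char) : ∀ (s : Nat) (acc : List Char),
    (PySem.List.pyRange (s : Int) (l.length : Int) 1).foldl
      (fun res j =>
        if [PySem.List.pyGetD l j ' '] = old ∧ j % 2 ≠ 0 then
          res ++ new
        else
          res ++ [PySem.List.pyGetD l j ' ']) acc
      = acc ++ pvG old new (l.drop s) s := by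
  intro s acc
  by_cases h : s < l.length
  · have hr : PySem.List.pyRange (s : Int) (l.length : Int) 1
        = (s : Int) :: PySem.List.pyRange ((s : Int) + 1) (l.length : Int) 1 :=
      PySem.List.pyRange_one_cons (by exact_mod_cast h)
    have hd : l.drop s = l[s] :: l.drop (s + 1) := (List.getElem_cons_drop h).symm
    have hget : PySem.List.pyGetD l (s : Int) ' ' = l[s] := by
      rw [PySem.List.pyGetD_natCast]; exact List.getD_eq_getElem l ' ' h
    have hpar : ((s : Int) % 2 ≠ 0) ↔ (s % 2 ≠ 0) := by omega
    rw [hr, List.foldl_cons, hd]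
    have := pvFold_eq_pvG old new l (s + 1)
    rw [show ((s : Int) + 1) = ((s + 1 : Nat) : Int) by push_cast; ring] at *
    rw [this]
    simp only [pvG, hget]
    by_cases hc : [l[s]] = old ∧ s % 2 ≠ 0
    · rw [if_pos ⟨hc.1, hpar.mpr hc.2⟩, if_pos hc, List.append_assoc]
    · have hc' : ¬ ([l[s]] = old ∧ (s : Int) % 2 ≠ 0) := by
        intro hx; exact hc ⟨hx.1, hpar.mp hx.2⟩
      rw [if_neg hc', if_neg hc, List.append_assoc]
  · have hr : PySem.List.pyRange (s : Int) (l.length : Int) 1 = [] :=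
      PySem.List.pyRange_one_eq_nil (by exact_mod_cast Nat.le_of_not_lt h)
    have hd : l.drop s = [] := List.drop_eq_nil_of_le (Nat.le_of_not_lt h)
    rw [hr, hd]; simp [pvG]
termination_by s => l.length - s
decreasing_by omega

theorem pvPairs_eq_pvG (old new : List Char) : ∀ (l : List Char) (i : Nat), i % 2 = 0 →
    pvPairs old new l = pvG old new l i
  | [], i, _ => rfl
  | [a], i, h => by
      simp only [pvPairs, pvG]
      rw [if_neg (by omega : ¬ ([a] = old ∧ i % 2 ≠ 0))]
      rfl
  | a :: b :: r, i, h => by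
      simp only [pvPairs, pvG]
      rw [if_neg (by omega : ¬ ([a] = old ∧ i % 2 ≠ 0))]
      have hb : ((i + 1) % 2 ≠ 0) := by omega
      rw [pvPairs_eq_pvG old new r (i + 2) (by omega)]
      by_cases hc : [b] = old
      · rw [if_pos hc, if_pos ⟨hc, hb⟩]; simp
      · rw [if_neg hc, if_neg (by tauto : ¬ ([b] = old ∧ (i + 1) % 2 ≠ 0))]; simp

-- ===== VERDICT (by name: the statement is the Claim_ definition above) =====
theorem letter_in_string_chenger_spec : Claim_equal_letter_in_string_chenger := by
  intro str old new _
  show _ = _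
  unfold letter_in_string_chenger letter_in_string_chenger_alt
  have h0 := pvFold_eq_pvG old.toList new.toList str.toList 0 []
  simp only [Nat.cast_zero] at h0
  rw [h0, List.drop_zero, List.nil_append,
    pvPairs_eq_pvG old.toList new.toList str.toList 0 rfl]
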